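-- pv_equiv track=rewrite | github.com/namhn89/algorithm | codelearn/sasuke30/d/d.py | chooseEmployee
-- ===== SOURCE A (Python) =====
-- from collections import defaultdict
--
-- def myfn (c):
--     return [-c[0], c[1]]
--
-- def chooseEmployee(skill, salary, requestSkill, k):
--     a = defaultdict(int)
--     p = defaultdict(list)
--
--     for i in range(len(skill)):
--         p[skill[i]].append(salary[i])
--     for c in p:
--         sorted(p[c])
--
--     for c in skill:
--         a[c] += 1
--
--     b = list()
--     for c in a:
--         b.append((a[c], c))
--
--     b.sort(key=myfn)
--
--     res = 0
--     y = p[requestSkill]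
--     y.sort()
--     for c in y:
--         if k > 0:
--             res += c
--             k -= 1
--
--     if k > 0:
--         for c in b :
--             y = p[c[1]]
--             y.sort()
--             if c[1] != requestSkill:
--                 for z in y:
--                     if k > 0:
--                         res += z
--                         k -= 1
--
--     if k > 0:
--         return -1
--     else:
--         return res
-- ===== SOURCE B (Python) =====
-- from collections import Counter
--
-- def chooseEmployee(skill, salary, requestSkill, k):
--     if k <= 0:
--         return 0
--     if k > len(skill):
--         return -1
--     cnt = Counter(skill)
--     order = [requestSkill] + sorted((s for s in cnt if s != requestSkill),
--                                     key=lambda s: (-cnt[s], s))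
--     rank = {s: i for i, s in enumerate(order)}
--     picked = sorted(zip(skill, salary), key=lambda e: (rank[e[0]], e[1]))[:k]
--     return sum(v for _, v in picked)
-- ===== Notes on version B (the rewrite author's own statement) =====
-- stated objective: alternative
-- what changed: B replaces A's dict-of-lists bucket grouping, per-group sorts and two stateful res/k greedy loops by assigning each skill a numeric priority rank (requestSkill = 0, then skills by (-count, name)) and performing ONE global decorate-sort of the (skill, salary) pairs by (rank, salary), returning the sum of the k-prefix slice.
import Mathlib
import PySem

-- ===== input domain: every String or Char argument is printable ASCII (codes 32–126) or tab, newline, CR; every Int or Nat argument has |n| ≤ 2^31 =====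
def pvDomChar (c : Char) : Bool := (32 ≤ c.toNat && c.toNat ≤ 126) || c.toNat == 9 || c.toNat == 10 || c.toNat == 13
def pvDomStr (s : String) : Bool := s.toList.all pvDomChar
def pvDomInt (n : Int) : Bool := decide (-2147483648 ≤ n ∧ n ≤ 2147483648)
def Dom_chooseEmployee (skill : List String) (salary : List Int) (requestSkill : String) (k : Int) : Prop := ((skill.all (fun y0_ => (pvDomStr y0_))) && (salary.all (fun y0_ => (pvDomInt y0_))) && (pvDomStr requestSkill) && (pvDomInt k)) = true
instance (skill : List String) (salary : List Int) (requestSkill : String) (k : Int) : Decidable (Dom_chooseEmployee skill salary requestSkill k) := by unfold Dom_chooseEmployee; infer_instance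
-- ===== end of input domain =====

-- B replaces A's dict-of-lists grouping + two stateful res/k greedy loops by one global
-- decorate-sort: each skill gets a numeric priority rank (requestSkill = 0, then the other
-- skills by (-count, name)), the (skill, salary) pairs are sorted once by (rank, salary),
-- and the answer is the sum of the k-prefix slice.  Same asymptotic cost, different algorithm.
-- A's in-place sorts/defaultdict insertions mutate only A-local objects, not the arguments.

-- ===== PORT A =====
def myfn (c : Int × String) : Int × String := (-c.1, c.2)  -- Python key [-c[0], c[1]] compares lexicographically = tuple key

def chooseEmployee (skill : List String) (salary : List Int) (requestSkill : String) (k : Int) : Int :=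
  -- p[skill[i]].append(salary[i]); an out-of-range salary index is IndexError: defaulted here, excluded by Pre_
  let p : PySem.Dict String (List Int) :=
    (PySem.List.pyRange 0 (PySem.List.len skill)).foldl
      (fun d i => d.modify (PySem.List.pyGetD skill i "") [] (· ++ [PySem.List.pyGetD salary i 0]))
      PySem.Dict.empty
  -- 'for c in p: sorted(p[c])' computes sorted copies and discards them
  let _ := p.keys.map (fun c => PySem.List.sorted (p.getD c []) (fun z => z))
  let a : PySem.Dict String Int :=
    skill.foldl (fun d c => d.modify c 0 (· + 1)) PySem.Dict.empty
  let b : List (Int × String) :=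
    a.keys.foldl (fun b c => b ++ [(a.getD c 0, c)]) []
  let b := PySem.List.sorted2 b (fun c => (myfn c).1) (fun c => (myfn c).2)
  -- res/k carried as one pair; y.sort() ported by value (the in-place sort of the list
  -- stored in p is never observed unsorted afterwards, every later read re-sorts)
  let st : Int × Int := (0, k)
  let y := PySem.List.sorted (p.getD requestSkill []) (fun z => z)
  let st := y.foldl (fun st c => if st.2 > 0 then (st.1 + c, st.2 - 1) else st) st
  let st :=
    if st.2 > 0 then
      b.foldl (fun st c =>
        let y := PySem.List.sorted (p.getD c.2 []) (fun z => z)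
        if c.2 ≠ requestSkill then
          y.foldl (fun st z => if st.2 > 0 then (st.1 + z, st.2 - 1) else st) st
        else st) st
    else st
  if st.2 > 0 then -1 else st.1

-- ===== PORT B =====
def chooseEmployee_alt (skill : List String) (salary : List Int) (requestSkill : String) (k : Int) : Int :=
  if k ≤ 0 then 0
  else if (skill.length : Int) < k then -1
  else
    let cnt : PySem.Dict String Int := PySem.Dict.counter skill
    let order : List String :=
      requestSkill ::
        PySem.List.sorted2 (cnt.keys.filter (fun s => s ≠ requestSkill))
          (fun s => -(cnt.getD s 0)) (fun s => s)
    -- {s: i for i, s in enumerate(order)}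
    let rank : PySem.Dict String Int :=
      (PySem.List.enumerate order).foldl (fun d p => d.insert p.2 p.1) PySem.Dict.empty
    -- rank[e[0]]: every zipped skill is a key of cnt ⊆ order, so the lookup never fails;
    -- ported with getD (default unreachable)
    let picked := PySem.List.slice
      (PySem.List.sorted2 (skill.zip salary) (fun e => rank.getD e.1 0) (fun e => e.2))
      none (some k)
    (picked.map (fun e => e.2)).sum

-- ===== PRECONDITION & SPEC =====
-- A indexes salary[i] for every i < len(skill), so it raises IndexError iff salary is
-- shorter than skill; Pre_ excludes exactly those inputs (A returns on everything else).
def Pre_chooseEmployee (skill : List String) (salary : List Int) (requestSkill : String) (k : Int) : Prop :=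
  skill.length ≤ salary.length
instance (skill : List String) (salary : List Int) (requestSkill : String) (k : Int) : Decidable (Pre_chooseEmployee skill salary requestSkill k) := by unfold Pre_chooseEmployee; infer_instance

def pvWitness_chooseEmployee : List String × List Int × String × Int := (["a", "b", "a"], [3, 1, 2], "b", 2)

def Spec_chooseEmployee (skill : List String) (salary : List Int) (requestSkill : String) (k : Int) (out : Int) : Prop := out = chooseEmployee_alt skill salary requestSkill k
instance (skill : List String) (salary : List Int) (requestSkill : String) (k : Int) (out : Int) : Decidable (Spec_chooseEmployee skill salary requestSkill k out) := by unfold Spec_chooseEmployee; infer_instance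

-- ===== CLAIM (what is proved, stated in full; the proofs are below) =====
def Claim_equal_chooseEmployee : Prop := ∀ (skill : List String) (salary : List Int) (requestSkill : String) (k : Int), Dom_chooseEmployee skill salary requestSkill k → Pre_chooseEmployee skill salary requestSkill k → Spec_chooseEmployee skill salary requestSkill k (chooseEmployee skill salary requestSkill k)

-- ===== LEMMAS AND PROOFS =====

-- the take-while-budget loop shared by A's two inner loops
def tl (st : Int × Int) (ys : List Int) : Int × Int :=
  ys.foldl (fun st c => if st.2 > 0 then (st.1 + c, st.2 - 1) else st) st

theorem tl_spec (ys : List Int) (res k : Int) :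
    tl (res, k) ys = (res + ((ys.take k.toNat).sum), k - min (max k 0) (ys.length : Int)) := by
  induction ys generalizing res k with
  | nil => simp [tl]
  | cons y ys ih =>
    by_cases hk : 0 < k
    · have h1 : k.toNat = (k - 1).toNat + 1 := by omega
      simp only [tl, List.foldl_cons, if_pos hk] at *
      rw [ih (res + y) (k - 1), h1]
      simp only [List.take_succ_cons, List.sum_cons, List.length_cons, Prod.mk.injEq]
      refine ⟨by ring, by push_cast; omega⟩
    · have h0 : k.toNat = 0 := by omega
      simp only [tl, List.foldl_cons, if_neg hk] at *
      rw [ih res k, h0]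
      simp only [List.take_zero, List.sum_nil, List.length_cons, Prod.mk.injEq]
      refine ⟨by trivial, by push_cast; omega⟩

theorem tl_nonpos (ys : List Int) (st : Int × Int) (h : st.2 ≤ 0) : tl st ys = st := by
  obtain ⟨res, k⟩ := st
  rw [tl_spec]
  simp only at h
  have h0 : k.toNat = 0 := by omega
  simp only [h0, List.take_zero, List.sum_nil, add_zero, Prod.mk.injEq]
  refine ⟨by trivial, by omega⟩

theorem tl_append (xs ys : List Int) (st : Int × Int) : tl st (xs ++ ys) = tl (tl st xs) ys := by
  simp [tl, List.foldl_append]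

theorem tl_flatMap {α : Type} (l : List α) (g : α → List Int) (st : Int × Int) :
    l.foldl (fun st x => tl st (g x)) st = tl st (l.flatMap g) := by
  induction l generalizing st with
  | nil => simp [tl]
  | cons x l ih =>
    simp only [List.foldl_cons, List.flatMap_cons, tl_append]
    exact ih _

theorem insertBy_map {α β : Type} (bef : β → β → Bool) (bef' : α → α → Bool) (f : α → β)
    (h : ∀ a b, bef (f a) (f b) = bef' a b) (x : α) (l : List α) :
    PySem.List.insertBy bef (f x) (l.map f) = (PySem.List.insertBy bef' x l).map f := by
  induction l with
  | nil => simp [PySem.List.insertBy]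
  | cons y ys ih =>
    simp only [List.map_cons, PySem.List.insertBy, h]
    by_cases hb : bef' x y
    · simp [hb]
    · simp [hb, ih]

theorem foldl_insertBy_map {α β : Type} (bef : β → β → Bool) (bef' : α → α → Bool) (f : α → β)
    (h : ∀ a b, bef (f a) (f b) = bef' a b) (xs : List α) (acc : List α) :
    List.foldl (fun acc x => PySem.List.insertBy bef x acc) (acc.map f) (xs.map f)
      = (List.foldl (fun acc x => PySem.List.insertBy bef' x acc) acc xs).map f := by
  induction xs generalizing acc with
  | nil => rfl
  | cons x xs ih =>
    simp only [List.map_cons, List.foldl_cons]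
    rw [insertBy_map bef bef' f h x acc]
    exact ih _

theorem sorted2_map {α β κ₂ : Type} [LT κ₂] [DecidableLT κ₂]
    (f : α → β) (k1 : β → Int) (k2 : β → κ₂) (xs : List α) :
    PySem.List.sorted2 (xs.map f) k1 k2 false
      = (PySem.List.sorted2 xs (fun a => k1 (f a)) (fun a => k2 (f a)) false).map f := by
  simp only [PySem.List.sorted2, Bool.false_eq_true, if_false]
  exact foldl_insertBy_map _ _ f (fun a b => rfl) xs []

-- sorted2 IS sorted by the lexicographic pair key
theorem sorted2_eq_sorted_lex {α κ₁ κ₂ : Type} [LinearOrder κ₁] [LinearOrder κ₂]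
    (xs : List α) (k1 : α → κ₁) (k2 : α → κ₂) :
    PySem.List.sorted2 xs k1 k2 false
      = PySem.List.sorted xs (fun x => toLex (k1 x, k2 x)) false := by
  have hbef : (fun a b => decide (k1 a < k1 b) || (!decide (k1 b < k1 a) && decide (k2 a < k2 b)))
      = (fun a b => decide ((fun x => toLex (k1 x, k2 x)) a < (fun x => toLex (k1 x, k2 x)) b)) := by
    funext a b
    rcases lt_trichotomy (k1 a) (k1 b) with h | h | h
    · simp [Prod.Lex.lt_iff, h]
    · simp [Prod.Lex.lt_iff, h]
    · simp [Prod.Lex.lt_iff, h, h.asymm, h.ne']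
  rw [PySem.List.sorted_eq_foldl_insertBy]
  simp only [PySem.List.sorted2, Bool.false_eq_true, if_false]
  rw [hbef]

-- the dict {s: i for i, s in enumerate(order)}: lookups
theorem rank_fold_skip {κ : Type} [BEq κ] [LawfulBEq κ] (t : List κ) (st : Int)
    (d : PySem.Dict κ Int) (s : κ) (v : Int) (h : s ∉ t) :
    ((PySem.List.enumerate t st).foldl (fun d p => d.insert p.2 p.1) d).getD s v = d.getD s v := by
  induction t generalizing st d with
  | nil => simp [PySem.List.enumerate]
  | cons x t ih =>
    simp only [List.mem_cons, not_or] at h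
    simp only [PySem.List.enumerate, List.foldl_cons]
    rw [ih (st + 1) _ (h.2)]
    simp [PySem.Dict.getD, PySem.Dict.get?_insert_of_ne _ _ h.1]

theorem rank_fold_getD {κ : Type} [BEq κ] [LawfulBEq κ] (t : List κ) (st : Int)
    (d : PySem.Dict κ Int) (hnd : t.Nodup) (i : Nat) (hi : i < t.length) :
    ((PySem.List.enumerate t st).foldl (fun d p => d.insert p.2 p.1) d).getD t[i] 0
      = st + (i : Int) := by
  induction t generalizing st d i with
  | nil => simp at hi
  | cons x t ih =>
    simp only [List.nodup_cons] at hnd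
    simp only [PySem.List.enumerate, List.foldl_cons]
    cases i with
    | zero =>
      simp only [List.getElem_cons_zero]
      rw [rank_fold_skip t (st + 1) _ _ _ hnd.1]
      simp [PySem.Dict.getD, PySem.Dict.get?_insert_self]
    | succ j =>
      simp only [List.getElem_cons_succ]
      rw [ih (st + 1) _ hnd.2 j (by simpa using hi)]
      push_cast; ring

-- count of x in the flatMap of per-key filters over a duplicate-free key list
theorem count_flatMap_filter {κ ν : Type} [DecidableEq κ] [DecidableEq ν]
    (ks : List κ) (l : List (κ × ν)) (hnd : ks.Nodup) (x : κ × ν) :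
    (ks.flatMap (fun s => l.filter (fun p => p.1 == s))).count x
      = if x.1 ∈ ks then l.count x else 0 := by
  induction ks with
  | nil => simp
  | cons s t ih =>
    simp only [List.nodup_cons] at hnd
    simp only [List.flatMap_cons, List.count_append, ih hnd.2, List.mem_cons]
    by_cases hx : x.1 = s
    · have h1 : (l.filter (fun p => p.1 == s)).count x = l.count x :=
        List.count_filter (by simp [hx])
      simp [h1, hx, hnd.1]
    · have h1 : (l.filter (fun p => p.1 == s)).count x = 0 := by
        rw [List.count_eq_zero]
        intro hmem
        exact hx (by simpa using (List.of_mem_filter hmem))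
      simp [h1, hx]

theorem perm_flatMap_filter {κ ν : Type} [DecidableEq κ] [DecidableEq ν]
    (ks : List κ) (l : List (κ × ν)) (hnd : ks.Nodup) (hcov : ∀ p ∈ l, p.1 ∈ ks) :
    (ks.flatMap (fun s => l.filter (fun p => p.1 == s))).Perm l := by
  rw [List.perm_iff_count]
  intro x
  rw [count_flatMap_filter ks l hnd x]
  by_cases hx : x.1 ∈ ks
  · simp [hx]
  · have h0 : l.count x = 0 := by
      rw [List.count_eq_zero]
      intro hmem
      exact hx (hcov x hmem)
    simp [hx, h0]

theorem flatMap_perm_congr {α β : Type} (l : List α) (f g : α → List β)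
    (h : ∀ a ∈ l, (f a).Perm (g a)) : (l.flatMap f).Perm (l.flatMap g) := by
  induction l with
  | nil => simp
  | cons a t ih =>
    simp only [List.flatMap_cons]
    exact (h a (by simp)).append (ih (fun a ha => h a (by simp [ha])))

-- builds of A (p, a, b) over the same data
theorem range_fold_eq_zip_fold {β : Type} (skill : List String) (salary : List Int)
    (h : skill.length ≤ salary.length) (f : β → String → Int → β) (init : β) :
    (PySem.List.pyRange 0 (PySem.List.len skill)).foldl
        (fun d i => f d (PySem.List.pyGetD skill i "") (PySem.List.pyGetD salary i 0)) init
      = (skill.zip salary).foldl (fun d p => f d p.1 p.2) init := by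
  have hlen : (skill.zip salary).length = skill.length := by
    simp [List.length_zip]; omega
  have hcongr : ∀ (d : β), ∀ i ∈ PySem.List.pyRange 0 (PySem.List.len skill),
      f d (PySem.List.pyGetD skill i "") (PySem.List.pyGetD salary i 0)
        = (fun d i => f d (PySem.List.pyGetD (skill.zip salary) i ("", 0)).1
            (PySem.List.pyGetD (skill.zip salary) i ("", 0)).2) d i := by
    intro d i hi
    rw [PySem.List.mem_pyRange_one] at hi
    simp only [PySem.List.len] at hi
    have h1 : i < ((skill.zip salary).length : Int) := by omega
    have h2 : i < (salary.length : Int) := by omega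
    simp only
    rw [PySem.List.pyGetD_eq_getElem skill "" hi.1 hi.2,
        PySem.List.pyGetD_eq_getElem salary 0 hi.1 h2,
        PySem.List.pyGetD_eq_getElem (skill.zip salary) ("", 0) hi.1 h1]
    simp [List.getElem_zip]
  rw [PySem.List.foldl_congr_mem _ _ _ _ hcongr]
  have hlen2 : PySem.List.len skill = PySem.List.len (skill.zip salary) := by
    simp [PySem.List.len, hlen]
  rw [hlen2]
  exact PySem.List.foldl_pyRange_zero_pyGetD (skill.zip salary) ("", 0)
        (fun d p => f d p.1 p.2) init

-- ===== VERDICT (by name: the statement is the Claim_ definition above) =====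
theorem chooseEmployee_spec : Claim_equal_chooseEmployee := by
  intro skill salary requestSkill k _ hpre
  have hpre' : skill.length ≤ salary.length := hpre
  unfold Spec_chooseEmployee chooseEmployee chooseEmployee_alt
  -- A's dict p is the fold over the zipped pairs
  have hP : List.foldl (fun d i => d.modify (PySem.List.pyGetD skill i "") []
        (fun x => x ++ [PySem.List.pyGetD salary i 0])) PySem.Dict.empty
        (PySem.List.pyRange 0 (PySem.List.len skill))
      = List.foldl (fun d sv => d.modify sv.1 [] (fun x => x ++ [sv.2])) PySem.Dict.empty
        (skill.zip salary) :=
    range_fold_eq_zip_fold skill salary hpre' (fun d s v => d.modify s [] (fun x => x ++ [v]))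
      PySem.Dict.empty
  rw [hP]
  set Z : List (String × Int) := skill.zip salary with hZ
  set G : PySem.Dict String (List Int) :=
    List.foldl (fun d sv => d.modify sv.1 [] (fun x => x ++ [sv.2])) PySem.Dict.empty Z with hGdef
  set cnt : PySem.Dict String Int := PySem.Dict.counter skill with hcntdef
  show
      (let bs := PySem.List.sorted2
          (List.foldl (fun b c => b ++ [(cnt.getD c 0, c)]) [] cnt.keys)
          (fun c => (myfn c).1) (fun c => (myfn c).2)
        let st1 := tl (0, k) (PySem.List.sorted (G.getD requestSkill []) (fun z => z))
        let st2 := if st1.2 > 0 then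
            List.foldl (fun st c => if c.2 ≠ requestSkill then
              tl st (PySem.List.sorted (G.getD c.2 []) (fun z => z)) else st) st1 bs
          else st1
        if st2.2 > 0 then -1 else st2.1)
    = (if k ≤ 0 then 0
       else if (skill.length : Int) < k then -1
       else
         ((PySem.List.slice
            (PySem.List.sorted2 Z
              (fun e => (((PySem.List.enumerate (requestSkill ::
                  PySem.List.sorted2 (cnt.keys.filter (fun s => s ≠ requestSkill))
                    (fun s => -(cnt.getD s 0)) (fun s => s))).foldl
                  (fun d p => d.insert p.2 p.1) PySem.Dict.empty).getD e.1 0))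
              (fun e => e.2))
            none (some k)).map (fun e => e.2)).sum)
  set rest : List String :=
    PySem.List.sorted2 (cnt.keys.filter (fun s => s ≠ requestSkill))
      (fun s => -(cnt.getD s 0)) (fun s => s) with hrestdef
  set order : List String := requestSkill :: rest with horderdef
  set R : PySem.Dict String Int :=
    (PySem.List.enumerate order).foldl (fun d p => d.insert p.2 p.1) PySem.Dict.empty with hRdef
  set S : List (String × Int) :=
    PySem.List.sorted2 Z (fun e => R.getD e.1 0) (fun e => e.2) with hSdef
  -- basic dictionary facts
  have hGs : ∀ c, G.getD c [] = (Z.filter (fun p => p.1 == c)).map (fun x => x.2) := by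
    intro c
    rw [hGdef]
    rw [PySem.Dict.getD_foldl_modify_append Z PySem.Dict.empty c]
    simp [PySem.Dict.getD_empty]
  have hndkeys : cnt.keys.Nodup := by
    rw [hcntdef]; exact PySem.Dict.nodup_keys_counter skill
  have hmemkeys : ∀ s ∈ skill, s ∈ cnt.keys := by
    intro s hs
    rw [hcntdef, PySem.Dict.keys_counter]
    exact (PySem.Set.mem_ofList _ _).2 hs
  -- A's pair list bs is the priority order O decorated with counts
  set O : List String :=
    PySem.List.sorted2 cnt.keys (fun c => -(cnt.getD c 0)) (fun c => c) with hOdef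
  have hbs : PySem.List.sorted2 (List.foldl (fun b c => b ++ [(cnt.getD c 0, c)]) [] cnt.keys)
        (fun c => (myfn c).1) (fun c => (myfn c).2)
      = O.map (fun c => (cnt.getD c 0, c)) := by
    rw [PySem.List.foldl_append_singleton_eq_map (fun c => (cnt.getD c 0, c)) cnt.keys [],
        List.nil_append,
        sorted2_map (fun c => (cnt.getD c 0, c)) (fun c => (myfn c).1) (fun c => (myfn c).2)
          cnt.keys]
    rfl
  -- rest is exactly the non-request part of O
  have hrest : O.filter (fun s => decide (s ≠ requestSkill)) = rest := by
    refine PySem.List.eq_of_perm_of_pairwise_le_of_injective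
      (key := fun s => toLex (-(cnt.getD s 0), s)) ?_ ?_ ?_ ?_
    · intro a b h
      simpa using congrArg (fun x => (ofLex x).2) h
    · have hOp : O.Perm cnt.keys := by
        rw [hOdef]; exact PySem.List.sorted2_perm _ _ _ false
      have hrp : rest.Perm (cnt.keys.filter (fun s => decide (s ≠ requestSkill))) := by
        rw [hrestdef]; exact PySem.List.sorted2_perm _ _ _ false
      exact (hOp.filter _).trans hrp.symm
    · rw [hOdef, sorted2_eq_sorted_lex]
      exact (PySem.List.sorted_pairwise _ _).filter _
    · rw [hrestdef, sorted2_eq_sorted_lex]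
      exact PySem.List.sorted_pairwise _ _
  have hrestperm : rest.Perm (cnt.keys.filter (fun s => decide (s ≠ requestSkill))) := by
    rw [hrestdef]; exact PySem.List.sorted2_perm _ _ _ false
  have hndrest : rest.Nodup := hrestperm.symm.nodup (hndkeys.filter _)
  have hreq_rest : requestSkill ∉ rest := by
    intro hmem
    have h := (hrestperm.mem_iff).1 hmem
    have h2 := (List.mem_filter.1 h).2
    simp at h2
  have hndorder : order.Nodup := by
    rw [horderdef]; exact List.nodup_cons.2 ⟨hreq_rest, hndrest⟩
  have hrank : ∀ (i : Nat) (hi : i < order.length), R.getD order[i] 0 = (i : Int) := by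
    intro i hi
    rw [hRdef]
    have h := rank_fold_getD order 0 PySem.Dict.empty hndorder i hi
    simpa using h
  have hranklt : order.Pairwise (fun s t => R.getD s 0 < R.getD t 0) := by
    rw [List.pairwise_iff_getElem]
    intro i j hi hj hij
    rw [hrank i hi, hrank j hj]
    exact_mod_cast hij
  have hrankinj : ∀ s ∈ order, ∀ t ∈ order, R.getD s 0 = R.getD t 0 → s = t := by
    intro s hs t ht h
    obtain ⟨i, hi, rfl⟩ := List.mem_iff_getElem.1 hs
    obtain ⟨j, hj, rfl⟩ := List.mem_iff_getElem.1 ht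
    rw [hrank i hi, hrank j hj] at h
    have hij : i = j := by exact_mod_cast h
    subst hij; rfl
  have hcov : ∀ p ∈ Z, p.1 ∈ order := by
    intro p hp
    have hsk : p.1 ∈ skill := by
      rw [hZ] at hp; exact (List.of_mem_zip hp).1
    by_cases hq : p.1 = requestSkill
    · rw [horderdef, hq]; exact List.mem_cons_self
    · rw [horderdef]
      refine List.mem_cons_of_mem _ ?_
      rw [hrestperm.mem_iff]
      exact List.mem_filter.2 ⟨hmemkeys _ hsk, by simpa using hq⟩
  -- the block decomposition E of the employees in A's pick order
  set E : List (String × Int) :=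
    order.flatMap (fun s => (PySem.List.sorted (G.getD s []) (fun z => z)).map (fun v => (s, v)))
    with hEdef
  have hblk : ∀ s, ((PySem.List.sorted (G.getD s []) (fun z => z)).map (fun v => (s, v))).Perm
      (Z.filter (fun p => p.1 == s)) := by
    intro s
    have h1 := (PySem.List.sorted_perm (G.getD s []) (fun z => z) false).map (fun v => (s, v))
    refine h1.trans ?_
    rw [hGs s, List.map_map]
    have h2 : ∀ p ∈ Z.filter (fun p => p.1 == s),
        ((fun v => (s, v)) ∘ (fun x => x.2)) p = id p := by
      intro p hp
      have hps : p.1 = s := by simpa using (List.mem_filter.1 hp).2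
      simp [Function.comp, ← hps]
    rw [List.map_congr_left h2, List.map_id]
  have hpermE : E.Perm Z := by
    rw [hEdef]
    exact (flatMap_perm_congr order _ _ (fun s _ => hblk s)).trans
      (perm_flatMap_filter order Z hndorder hcov)
  -- the global key: (rank, skill, salary), lexicographic
  set K : String × Int → Lex (Int × Lex (String × Int)) :=
    fun e => toLex (R.getD e.1 0, toLex (e.1, e.2)) with hKdef
  have hKinj : Function.Injective K := by
    intro a b h
    rw [hKdef] at h
    simpa using congrArg (fun x => ofLex (ofLex x).2) h
  have hpwE : E.Pairwise (fun a b => K a ≤ K b) := by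
    rw [hEdef, List.pairwise_flatMap]
    constructor
    · intro s _
      rw [List.pairwise_map]
      refine (PySem.List.sorted_pairwise (G.getD s []) (fun z => z)).imp ?_
      intro v w hvw
      exact Prod.Lex.le_iff.2 (Or.inr ⟨rfl, Prod.Lex.le_iff.2 (Or.inr ⟨rfl, hvw⟩)⟩)
    · refine hranklt.imp ?_
      intro s t hst x hx y hy
      obtain ⟨v, _, rfl⟩ := List.mem_map.1 hx
      obtain ⟨w, _, rfl⟩ := List.mem_map.1 hy
      exact Prod.Lex.le_iff.2 (Or.inl hst)
  have hpermS : S.Perm E := by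
    rw [hSdef]
    exact (PySem.List.sorted2_perm _ _ _ false).trans hpermE.symm
  have hSZ : S.Perm Z := hpermS.trans hpermE
  have hpwS : S.Pairwise (fun a b => K a ≤ K b) := by
    have h0 : S.Pairwise (fun a b =>
        toLex (R.getD a.1 0, a.2) ≤ toLex (R.getD b.1 0, b.2)) := by
      rw [hSdef, sorted2_eq_sorted_lex]
      exact PySem.List.sorted_pairwise _ _
    refine h0.imp_of_mem ?_
    intro a b ha hb hle
    have haZ : a ∈ Z := hSZ.mem_iff.1 ha
    have hbZ : b ∈ Z := hSZ.mem_iff.1 hb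
    rcases Prod.Lex.le_iff.1 hle with hlt | ⟨heq, hle2⟩
    · exact Prod.Lex.le_iff.2 (Or.inl hlt)
    · have hsk : a.1 = b.1 := hrankinj _ (hcov a haZ) _ (hcov b hbZ) heq
      exact Prod.Lex.le_iff.2 (Or.inr ⟨heq, Prod.Lex.le_iff.2 (Or.inr ⟨hsk, hle2⟩)⟩)
  have hSE : S = E :=
    PySem.List.eq_of_perm_of_pairwise_le_of_injective K hKinj hpermS hpwS hpwE
  -- A's pick order, flattened
  have hmapE : E.map (fun e => e.2)
      = PySem.List.sorted (G.getD requestSkill []) (fun z => z)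
        ++ rest.flatMap (fun s => PySem.List.sorted (G.getD s []) (fun z => z)) := by
    rw [hEdef, horderdef]
    simp only [List.flatMap_cons, List.map_append, List.map_flatMap, List.map_map]
    congr 1 <;> simp
  -- reduce A's loops
  have hloop : ∀ st1 : Int × Int,
      List.foldl (fun st c => if c.2 ≠ requestSkill then
          tl st (PySem.List.sorted (G.getD c.2 []) (fun z => z)) else st) st1
        (O.map (fun c => (cnt.getD c 0, c)))
      = tl st1 ((O.filter (fun s => decide (s ≠ requestSkill))).flatMap
          (fun s => PySem.List.sorted (G.getD s []) (fun z => z))) := by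
    intro st1
    rw [List.foldl_map]
    show List.foldl (fun st s => if s ≠ requestSkill then
        tl st (PySem.List.sorted (G.getD s []) (fun z => z)) else st) st1 O = _
    rw [PySem.List.foldl_ite_eq_foldl_filter (fun s => s ≠ requestSkill)
        (fun st s => tl st (PySem.List.sorted (G.getD s []) (fun z => z))) O st1]
    exact tl_flatMap _ _ _
  have hst2 : ∀ st1 : Int × Int,
      (if st1.2 > 0 then
        tl st1 ((O.filter (fun s => decide (s ≠ requestSkill))).flatMap
          (fun s => PySem.List.sorted (G.getD s []) (fun z => z)))
      else st1)
      = tl st1 ((O.filter (fun s => decide (s ≠ requestSkill))).flatMap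
          (fun s => PySem.List.sorted (G.getD s []) (fun z => z))) := by
    intro st1
    split
    · rfl
    · next h => exact (tl_nonpos _ st1 (by omega)).symm
  simp only [hbs, hloop]
  rw [hst2 (tl (0, k) (PySem.List.sorted (G.getD requestSkill []) (fun z => z))),
      ← tl_append, hrest,
      tl_spec (PySem.List.sorted (G.getD requestSkill []) (fun z => z)
        ++ rest.flatMap (fun s => PySem.List.sorted (G.getD s []) (fun z => z))) 0 k,
      zero_add, ← hmapE]
  -- lengths
  have hlenZ : Z.length = skill.length := by
    rw [hZ]; simp [List.length_zip]; omega
  have hlenE : ((E.map (fun e => e.2)).length : Int) = (skill.length : Int) := by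
    rw [List.length_map, hpermE.length_eq, hlenZ]
  by_cases hk : k ≤ 0
  · have h1 : k.toNat = 0 := by omega
    simp [hk, h1]
  · by_cases hl : (skill.length : Int) < k
    · have h2 : k - min (max k 0) (((E.map (fun e => e.2)).length : Int)) > 0 := by
        rw [hlenE]; omega
      rw [if_pos h2, if_neg hk, if_pos hl]
    · have h2 : ¬ (k - min (max k 0) (((E.map (fun e => e.2)).length : Int)) > 0) := by
        rw [hlenE]; omega
      simp only [if_neg h2, if_neg hk, if_neg hl]
      have h3 : PySem.List.slice S none (some k) = S.take k.toNat := by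
        have h4 := PySem.List.slice_to_natCast S k.toNat
        rw [show ((k.toNat : Nat) : Int) = k from by omega] at h4
        exact h4
      rw [h3, hSE, List.map_take]
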